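-- pv_equiv track=rewrite | github.com/ppvt228/zadachi2 | 4.py | evennot
-- ===== SOURCE A (Python) =====
-- def evennot(a):
--     ch = 0
--     nech = 0
--     kch = 0
--     knechet = 0
--     for s in range(len(a)):
--         if a[s] % 2 == 0:
--             kch += 1
--             ch = a[s]
--         else:
--             knechet += 1
--             nech = a[s]
--     if kch < knechet:
--         return ch
--     else:
--         return nech
-- ===== SOURCE B (Python) =====
-- def evennot(a):
--     kch = sum(1 for x in a if x % 2 == 0)
--     knechet = len(a) - kch
--     want = 0 if kch < knechet else 1
--     for x in reversed(a):
--         if x % 2 == want: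
--             return x
--     return 0
-- ===== Notes on version B (the rewrite author's own statement) =====
-- stated objective: simpler
-- what changed: Replaces the four-accumulator index loop by count-then-reverse-scan: count the evens once, decide which parity group is smaller, then scan from the end for the first element of that parity (0 if none).
import Mathlib
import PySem

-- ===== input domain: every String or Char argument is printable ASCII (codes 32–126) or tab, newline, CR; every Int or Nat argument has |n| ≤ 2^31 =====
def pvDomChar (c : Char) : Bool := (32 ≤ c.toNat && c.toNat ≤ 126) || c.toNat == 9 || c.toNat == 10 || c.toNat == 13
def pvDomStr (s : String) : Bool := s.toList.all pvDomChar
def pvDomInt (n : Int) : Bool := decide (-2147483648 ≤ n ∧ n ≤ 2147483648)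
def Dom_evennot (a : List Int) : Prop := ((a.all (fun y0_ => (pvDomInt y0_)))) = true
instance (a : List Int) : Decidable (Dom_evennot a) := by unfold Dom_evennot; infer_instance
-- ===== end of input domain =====

-- B replaces A's four-accumulator index loop by count-then-reverse-scan (simpler decomposition, same cost).

-- ===== PORT A =====
-- state (ch, nech, kch, knechet), updated exactly as A's loop body does
def evennotStep (st : Int × Int × Int × Int) (x : Int) : Int × Int × Int × Int :=
  if PySem.Int.mod x 2 = 0 then (x, st.2.1, st.2.2.1 + 1, st.2.2.2)
  else (st.1, x, st.2.2.1, st.2.2.2 + 1)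

def evennot (a : List Int) : Int :=
  let st := (PySem.List.pyRange 0 (a.length : Int) 1).foldl
    (fun st s => evennotStep st (PySem.List.pyGetD a s 0)) ((0 : Int), (0 : Int), (0 : Int), (0 : Int))
  if st.2.2.1 < st.2.2.2 then st.1 else st.2.1

-- ===== PORT B =====
-- the 'for x in reversed(a): if x % 2 == want: return x / return 0' loop of Source B
def evennotScan (want : Int) : List Int → Int
  | [] => 0
  | x :: xs => if PySem.Int.mod x 2 = want then x else evennotScan want xs

def evennot_alt (a : List Int) : Int :=
  let kch := a.foldl (fun acc x => if PySem.Int.mod x 2 = 0 then acc + 1 else acc) (0 : Int)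
  let knechet := (a.length : Int) - kch
  let want : Int := if kch < knechet then 0 else 1
  evennotScan want a.reverse

-- ===== PRECONDITION & SPEC =====
def Spec_evennot (a : List Int) (out : Int) : Prop := out = evennot_alt a
instance (a : List Int) (out : Int) : Decidable (Spec_evennot a out) := by unfold Spec_evennot; infer_instance

-- ===== CLAIM (what is proved, stated in full; the proofs are below) =====
def Claim_equal_evennot : Prop := ∀ (a : List Int), Dom_evennot a → Spec_evennot a (evennot a)

-- ===== LEMMAS AND PROOFS =====

-- counts of evens / odds, as left folds
def cntE (a : List Int) : Int := a.foldl (fun acc x => if PySem.Int.mod x 2 = 0 then acc + 1 else acc) 0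
def cntO (a : List Int) : Int := a.foldl (fun acc x => if PySem.Int.mod x 2 = 0 then acc else acc + 1) 0

theorem evennot_fold_char (a : List Int) :
    a.foldl evennotStep ((0 : Int), (0 : Int), (0 : Int), (0 : Int)) =
      (evennotScan 0 a.reverse, evennotScan 1 a.reverse, cntE a, cntO a) := by
  induction a using List.reverseRecOn with
  | nil => rfl
  | append_singleton l x ih =>
    have hs0 : evennotScan 0 ((l ++ [x]).reverse)
        = if PySem.Int.mod x 2 = 0 then x else evennotScan 0 l.reverse := by
      rw [List.reverse_append]; rfl
    have hs1 : evennotScan 1 ((l ++ [x]).reverse)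
        = if PySem.Int.mod x 2 = 1 then x else evennotScan 1 l.reverse := by
      rw [List.reverse_append]; rfl
    have hcE : cntE (l ++ [x]) = if PySem.Int.mod x 2 = 0 then cntE l + 1 else cntE l := by
      unfold cntE; rw [List.foldl_append]; rfl
    have hcO : cntO (l ++ [x]) = if PySem.Int.mod x 2 = 0 then cntO l else cntO l + 1 := by
      unfold cntO; rw [List.foldl_append]; rfl
    rw [List.foldl_append, ih, hs0, hs1, hcE, hcO]
    unfold evennotStep
    by_cases hx : (2 : Int) ∣ x
    · have hm : x % 2 = 0 := Int.emod_eq_zero_of_dvd hx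
      simp [List.foldl, hm]
    · have hm : x % 2 = 1 :=
        (Int.emod_two_eq x).resolve_left (fun h => hx (Int.dvd_of_emod_eq_zero h))
      simp [List.foldl, hm]

theorem cnt_sum (a : List Int) : cntE a + cntO a = (a.length : Int) := by
  induction a using List.reverseRecOn with
  | nil => rfl
  | append_singleton l x ih =>
    have hcE : cntE (l ++ [x]) = if PySem.Int.mod x 2 = 0 then cntE l + 1 else cntE l := by
      unfold cntE; rw [List.foldl_append]; rfl
    have hcO : cntO (l ++ [x]) = if PySem.Int.mod x 2 = 0 then cntO l else cntO l + 1 := by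
      unfold cntO; rw [List.foldl_append]; rfl
    rw [hcE, hcO, List.length_append]
    simp
    omega

-- ===== VERDICT (by name: the statement is the Claim_ definition above) =====
theorem evennot_spec : Claim_equal_evennot := by
  intro a _
  unfold Spec_evennot evennot evennot_alt
  rw [PySem.List.foldl_pyRange_zero_pyGetD' a 0 evennotStep, evennot_fold_char]
  have h := cnt_sum a
  have hiff : (cntE a < cntO a) ↔ (cntE a < (a.length : Int) - cntE a) := by omega
  show (if cntE a < cntO a then evennotScan 0 a.reverse else evennotScan 1 a.reverse) =
    evennotScan (if cntE a < (a.length : Int) - cntE a then 0 else 1) a.reverse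
  by_cases hc : cntE a < cntO a
  · rw [if_pos hc, if_pos (hiff.mp hc)]
  · rw [if_neg hc, if_neg (fun h2 => hc (hiff.mpr h2))]
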